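-- pv_equiv track=rewrite | github.com/Antoxa005/Koomier | SHIT.py | TryFindFirstPattern
-- ===== SOURCE A (Python) =====
-- def Compare(array, comparand, startIndex):
--     if startIndex + len(comparand) > len(array): return False
--
--     for i in range(len(comparand)):
--         if comparand[i] != array[startIndex+i]: return False
--
--     return True
--
-- def GetComparand(array, startIndex, maxLen):
--     returnList = []
--     for i in range(startIndex, startIndex + maxLen): returnList.append(array[i])
--
--     return returnList
--
-- def TryFindFirstPattern(array, maxLen):
--     if maxLen * 2 > len(array): return (False, 0, 0, [], 0)
--
--     for i in range(len(array) - 2 * maxLen + 1):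
--         comparand = GetComparand(array, i, maxLen)
--         numOfRep = 0
--
--         for e in range(i + maxLen, len(array) - maxLen + 1, maxLen):
--             if not Compare(array, comparand, e): break
--             numOfRep += 1
--
--         if numOfRep > 0: return (True, i, i + maxLen * (numOfRep+1), comparand, numOfRep + 1)
--
--     return (False, 0, 0, [], 0)
-- ===== SOURCE B (Python) =====
-- def TryFindFirstPattern(array, maxLen):
--     n = len(array)
--     if maxLen <= 0 or 2 * maxLen > n:
--         return (False, 0, 0, [], 0)
--     L = maxLen
--     m = n - L
--     # single forward scan over the self-overlap equality sequence array[t] == array[t+L]: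
--     # s is the start of the current streak of equal positions; the first streak that
--     # reaches length L starts the first pattern, and its full length gives the repeat count.
--     s = 0
--     t = 0
--     while t < m:
--         if array[t] != array[t + L]:
--             s = t + 1
--         elif t + 1 - s == L:
--             i = s
--             t += 1
--             while t < m and array[t] == array[t + L]:
--                 t += 1
--             k = (t - i) // L
--             return (True, i, i + L * (k + 1), array[i:i + L], k + 1)
--         t += 1
--     return (False, 0, 0, [], 0)
-- ===== Notes on version B (the rewrite author's own statement) =====
-- stated objective: alternative
-- what changed: Replaces the nested block-by-block rescans with a single forward scan over the self-overlap equalities array[t] == array[t+maxLen], tracking the current streak of equal positions; the first streak reaching length maxLen gives the pattern start and its full length the repeat count (each position is compared once instead of once per candidate start).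
import Mathlib
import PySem

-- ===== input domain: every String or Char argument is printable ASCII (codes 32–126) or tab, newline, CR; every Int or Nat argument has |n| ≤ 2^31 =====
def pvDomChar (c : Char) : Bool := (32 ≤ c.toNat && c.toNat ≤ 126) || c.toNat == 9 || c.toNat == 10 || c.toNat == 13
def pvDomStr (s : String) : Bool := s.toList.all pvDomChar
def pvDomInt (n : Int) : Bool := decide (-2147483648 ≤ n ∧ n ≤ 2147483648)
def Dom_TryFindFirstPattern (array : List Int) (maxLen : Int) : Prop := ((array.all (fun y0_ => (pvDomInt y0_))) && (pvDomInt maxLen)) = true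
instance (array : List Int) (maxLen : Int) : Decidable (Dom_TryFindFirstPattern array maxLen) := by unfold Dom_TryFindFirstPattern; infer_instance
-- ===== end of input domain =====

-- B replaces A's nested block rescans with one forward scan over the self-overlap
-- equalities array[t] == array[t+maxLen] (objective: alternative single-pass algorithm).

-- ===== PORT A =====
-- Every index A actually reads is in range on the inputs admitted by Pre_, so pyGetD's default is never produced.
def pvCompare (array comparand : List Int) (startIndex : Int) : Bool :=
  if startIndex + (comparand.length : Int) > (array.length : Int) then false
  else (List.range comparand.length).all (fun i =>
    comparand.getD i 0 == PySem.List.pyGetD array (startIndex + (i : Int)) 0)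

def pvGetComparand (array : List Int) (startIndex maxLen : Int) : List Int :=
  (PySem.List.pyRange startIndex (startIndex + maxLen) 1).map (fun i => PySem.List.pyGetD array i 0)

-- the inner 'for e in range(i+maxLen, len-maxLen+1, maxLen): if not Compare: break; numOfRep += 1'
def pvInner (array comparand : List Int) : List Int → Int
  | [] => 0
  | e :: rest => if pvCompare array comparand e then pvInner array comparand rest + 1 else 0

-- the outer 'for i in range(len(array) - 2*maxLen + 1)' with its early return
def pvOuter (array : List Int) (maxLen : Int) : List Int → Bool × Int × Int × List Int × Int
  | [] => (false, 0, 0, [], 0)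
  | i :: rest =>
      let comparand := pvGetComparand array i maxLen
      let numOfRep := pvInner array comparand
          (PySem.List.pyRange (i + maxLen) ((array.length : Int) - maxLen + 1) maxLen)
      if numOfRep > 0 then (true, i, i + maxLen * (numOfRep + 1), comparand, numOfRep + 1)
      else pvOuter array maxLen rest

def TryFindFirstPattern (array : List Int) (maxLen : Int) : Bool × Int × Int × List Int × Int :=
  if maxLen * 2 > (array.length : Int) then (false, 0, 0, [], 0)
  else pvOuter array maxLen (PySem.List.pyRange 0 ((array.length : Int) - 2 * maxLen + 1) 1)

-- ===== PORT B =====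
-- Source B's inner 'while t < m and array[t] == array[t + L]: t += 1' (returns the final t)
def pvExtend (array : List Int) (L m t : Nat) : Nat :=
  if t < m then
    (if array.getD t 0 == array.getD (t + L) 0 then pvExtend array L m (t + 1) else t)
  else t
termination_by m - t

-- Source B's outer 'while t < m' loop over the state (s, t)
def pvLoop (array : List Int) (L m s t : Nat) : Bool × Int × Int × List Int × Int :=
  if t < m then
    if array.getD t 0 != array.getD (t + L) 0 then pvLoop array L m (t + 1) (t + 1)
    else if t + 1 - s = L then
      let i := s
      let t2 := pvExtend array L m (t + 1)
      let k := (t2 - i) / L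
      (true, (i : Int), (i : Int) + (L : Int) * ((k : Int) + 1),
        PySem.List.slice array (some (i : Int)) (some ((i : Int) + (L : Int))), (k : Int) + 1)
    else pvLoop array L m s (t + 1)
  else (false, 0, 0, [], 0)
termination_by m - t

def TryFindFirstPattern_alt (array : List Int) (maxLen : Int) : Bool × Int × Int × List Int × Int :=
  if maxLen ≤ 0 ∨ 2 * maxLen > (array.length : Int) then (false, 0, 0, [], 0)
  else pvLoop array maxLen.toNat (array.length - maxLen.toNat) 0 0

-- ===== PRECONDITION & SPEC =====
-- Pre_ excludes exactly maxLen = 0, on which A raises ValueError (range() step 0); A returns on every other input.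
def Pre_TryFindFirstPattern (array : List Int) (maxLen : Int) : Prop := maxLen ≠ 0
instance (array : List Int) (maxLen : Int) : Decidable (Pre_TryFindFirstPattern array maxLen) := by unfold Pre_TryFindFirstPattern; infer_instance
def pvWitness_TryFindFirstPattern : List Int × Int := ([1, 1, 2], 1)

def Spec_TryFindFirstPattern (array : List Int) (maxLen : Int) (out : Bool × Int × Int × List Int × Int) : Prop := out = TryFindFirstPattern_alt array maxLen
instance (array : List Int) (maxLen : Int) (out : Bool × Int × Int × List Int × Int) : Decidable (Spec_TryFindFirstPattern array maxLen out) := by unfold Spec_TryFindFirstPattern; infer_instance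

-- ===== CLAIM (what is proved, stated in full; the proofs are below) =====
def Claim_equal_TryFindFirstPattern : Prop := ∀ (array : List Int) (maxLen : Int), Dom_TryFindFirstPattern array maxLen → Pre_TryFindFirstPattern array maxLen → Spec_TryFindFirstPattern array maxLen (TryFindFirstPattern array maxLen)

-- ===== LEMMAS AND PROOFS =====

-- proof-only abstraction: the length of the streak of positions s ≥ t with array[s] == array[s+L], cut at m
def runF (array : List Int) (L m : Nat) (t : Nat) : Nat :=
  if t < m then (if array.getD t 0 == array.getD (t + L) 0 then runF array L m (t + 1) + 1 else 0) else 0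
termination_by m - t

-- proof-only abstraction of both loops: first i with runF i ≥ L, with the returned tuple
def pvScanF (array : List Int) (L : Nat) : List Nat → Bool × Int × Int × List Int × Int
  | [] => (false, 0, 0, [], 0)
  | i :: rest =>
      if L ≤ runF array L (array.length - L) i then
        (true, (i : Int),
          (i : Int) + (L : Int) * (((runF array L (array.length - L) i / L : Nat) : Int) + 1),
          (array.drop i).take L, ((runF array L (array.length - L) i / L : Nat) : Int) + 1)
      else pvScanF array L rest

theorem runF_of_ge {array : List Int} {L m t : Nat} (h : m ≤ t) : runF array L m t = 0 := by
  rw [runF]; simp [Nat.not_lt.mpr h]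

-- bracket: c ≤ run[t] iff the next c positions all satisfy array[s] == array[s+L]
theorem runF_ge_iff (array : List Int) (L m : Nat) : ∀ c t, t ≤ m →
    (c ≤ runF array L m t ↔ (t + c ≤ m ∧ ∀ s, t ≤ s → s < t + c → array.getD s 0 = array.getD (s + L) 0)) := by
  intro c
  induction c with
  | zero =>
    intro t ht
    constructor
    · intro _
      exact ⟨by omega, fun s h1 h2 => absurd h2 (by omega)⟩
    · intro _
      exact Nat.zero_le _
  | succ c ih =>
    intro t ht
    by_cases htm : t < m
    · rw [runF]
      rw [if_pos htm]
      by_cases heq : array.getD t 0 = array.getD (t + L) 0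
      · rw [if_pos (by simpa using heq)]
        constructor
        · intro h
          have hc : c ≤ runF array L m (t + 1) := by omega
          obtain ⟨h1, h2⟩ := (ih (t + 1) (by omega)).mp hc
          refine ⟨by omega, fun s hs1 hs2 => ?_⟩
          by_cases hst : s = t
          · subst hst; exact heq
          · exact h2 s (by omega) (by omega)
        · rintro ⟨h1, h2⟩
          have : c ≤ runF array L m (t + 1) :=
            (ih (t + 1) (by omega)).mpr ⟨by omega, fun s a b => h2 s (by omega) (by omega)⟩
          omega
      · rw [if_neg (by simpa using heq)]
        constructor
        · intro h; omega
        · rintro ⟨h1, h2⟩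
          exact absurd (h2 t (le_refl t) (by omega)) heq
    · rw [runF_of_ge (by omega)]
      constructor
      · intro h; omega
      · rintro ⟨h1, h2⟩; omega

theorem runF_le (array : List Int) (L m : Nat) : ∀ t, runF array L m t ≤ m - t := by
  intro t
  induction' hd : m - t with d ih generalizing t
  · rw [runF_of_ge (by omega)]
  · rw [runF]
    split
    · split
      · have := ih (t + 1) (by omega)
        omega
      · omega
    · omega

-- telescoping: stepping-point equalities chain into a k·L jump
theorem pv_tele (array : List Int) (L : Nat) : ∀ k a,
    (∀ u, u < k → array.getD (a + u * L) 0 = array.getD (a + u * L + L) 0) →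
    array.getD a 0 = array.getD (a + k * L) 0 := by
  intro k
  induction k with
  | zero => intro a _; simp
  | succ k ih =>
    intro a h
    have h0 := h 0 (by omega)
    simp only [Nat.zero_mul, Nat.add_zero] at h0
    have h1 : array.getD (a + L) 0 = array.getD (a + L + k * L) 0 := by
      refine ih (a + L) (fun u hu => ?_)
      have := h (u + 1) (by omega)
      have e1 : a + (u + 1) * L = a + L + u * L := by ring
      rwa [e1] at this
    have e2 : a + L + k * L = a + (k + 1) * L := by ring
    rw [h0, h1, e2]

-- blocks 1..c all equal to block 0 ⇒ every adjacent offset-L pair in [i, i+c·L) is equal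
theorem pv_eq_of_blocks (array : List Int) (L i c : Nat) (hL : 1 ≤ L)
    (hblocks : ∀ c', 1 ≤ c' → c' ≤ c → ∀ j, j < L → array.getD (i + j) 0 = array.getD (i + c' * L + j) 0) :
    ∀ s, i ≤ s → s < i + c * L → array.getD s 0 = array.getD (s + L) 0 := by
  intro s h1 h2
  set d := s - i with hd
  set c' := d / L with hc'
  set j := d % L with hj
  have hdm : c' * L + j = d := by rw [hc', hj, Nat.mul_comm]; exact Nat.div_add_mod d L
  have hjL : j < L := Nat.mod_lt _ (by omega)
  have hcc : c' < c := by
    rw [hc']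
    exact (Nat.div_lt_iff_lt_mul (by omega)).mpr (by omega)
  have hs : s = i + c' * L + j := by omega
  have hsL : s + L = i + (c' + 1) * L + j := by
    rw [Nat.succ_mul]
    omega
  have hleft : array.getD s 0 = array.getD (i + j) 0 := by
    rw [hs]
    rcases Nat.eq_zero_or_pos c' with h0 | h0
    · simp [h0]
    · exact (hblocks c' (by omega) (by omega) j hjL).symm
  have hright : array.getD (s + L) 0 = array.getD (i + j) 0 := by
    rw [hsL]
    exact (hblocks (c' + 1) (Nat.succ_le_succ (Nat.zero_le _)) hcc j hjL).symm
  rw [hleft, hright]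

-- the comparand equals the slice array[i:i+L]
theorem pv_comparand_eq (array : List Int) (L i : Nat) (hi : i + L ≤ array.length) :
    pvGetComparand array (i : Int) (L : Int) = (array.drop i).take L := by
  unfold pvGetComparand
  rw [show ((i : Int) + (L : Int)) = (((i + L : Nat) : Int)) by push_cast; ring]
  rw [PySem.List.pyRange_one]
  have h1 : (((i + L : Nat) : Int) - (i : Nat)).toNat = L := by omega
  rw [h1]
  apply List.ext_getElem
  · simp; omega
  · intro j hj1 hj2
    simp only [List.getElem_map, List.getElem_range]
    rw [show ((i : Int) + (j : Int)) = (((i + j : Nat) : Int)) by push_cast; ring]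
    rw [PySem.List.pyGetD_natCast]
    rw [List.getElem_take, List.getElem_drop]
    rw [List.getD_eq_getElem _ _ (by simp at hj1 ⊢; omega)]

theorem pv_compare_iff (array comparand : List Int) (e : Nat)
    (he : e + comparand.length ≤ array.length) :
    pvCompare array comparand (e : Int) = true ↔
      ∀ j, j < comparand.length → comparand.getD j 0 = array.getD (e + j) 0 := by
  unfold pvCompare
  rw [if_neg (by omega)]
  simp only [List.all_eq_true, List.mem_range, beq_iff_eq]
  constructor
  · intro h j hj
    have := h j hj
    rwa [show ((e : Int) + (j : Int)) = (((e + j : Nat) : Int)) by push_cast; ring,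
      PySem.List.pyGetD_natCast] at this
  · intro h j hj
    rw [show ((e : Int) + (j : Int)) = (((e + j : Nat) : Int)) by push_cast; ring,
      PySem.List.pyGetD_natCast]
    exact h j hj

theorem pvInner_eq_takeWhile (array comparand : List Int) : ∀ l : List Int,
    pvInner array comparand l = ((l.takeWhile (fun e => pvCompare array comparand e)).length : Int) := by
  intro l
  induction l with
  | nil => simp [pvInner]
  | cons e rest ih =>
    rw [pvInner]
    by_cases h : pvCompare array comparand e = true
    · rw [if_pos h, ih, List.takeWhile_cons_of_pos (by simpa using h)]
      simp [List.length_cons]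
    · rw [if_neg h, List.takeWhile_cons_of_neg (by simpa using h)]
      simp

theorem pv_takeWhile_map_range (p : Int → Bool) :
    ∀ (q : Nat) (f : Nat → Int) (k : Nat), k ≤ q → (∀ c, c < k → p (f c) = true) →
    (k = q ∨ p (f k) = false) →
    (((List.range q).map f).takeWhile p).length = k := by
  intro q
  induction q with
  | zero =>
    intro f k hk _ _
    have : k = 0 := by omega
    subst this
    simp
  | succ q ih =>
    intro f k hk hall hstop
    rw [List.range_succ_eq_map, List.map_cons, List.map_map]
    cases k with
    | zero =>
      have hp0 : p (f 0) = false := by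
        rcases hstop with h | h
        · omega
        · exact h
      rw [List.takeWhile_cons_of_neg (by simp [hp0])]
      simp
    | succ k =>
      have hp0 : p (f 0) = true := hall 0 (by omega)
      rw [List.takeWhile_cons_of_pos (by simp [hp0])]
      simp only [List.length_cons]
      have := ih (f ∘ Nat.succ) k (by omega)
        (fun c hc => by simpa [Function.comp] using hall (c + 1) (by omega))
        (by
          rcases hstop with h | h
          · left; omega
          · right; simpa [Function.comp] using h)
      omega

theorem pv_pyRange_neg_nil (a b s : Int) (hs : s < 0) (hab : a ≤ b) :
    PySem.List.pyRange a b s = [] := by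
  have h1 : ¬ s = 0 := by omega
  have h2 : ¬ 0 < s := by omega
  have h3 : ¬ b < a := by omega
  simp [PySem.List.pyRange, h1, h2, h3]

-- per-start-index equivalence: A's inner repetition count is run[i] / L
theorem pv_inner_count (array : List Int) (L i : Nat) (hL : 1 ≤ L)
    (hi : i + 2 * L ≤ array.length) :
    pvInner array (pvGetComparand array (i : Int) (L : Int))
        (PySem.List.pyRange ((i : Int) + (L : Int)) ((array.length : Int) - (L : Int) + 1) (L : Int))
      = ((runF array L (array.length - L) i / L : Nat) : Int) := by
  set n := array.length with hn
  set m := n - L with hm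
  set r := runF array L m i with hr
  set k := r / L with hk
  set q := (m - i) / L with hq2
  have hiL : i + L ≤ n := by omega
  have hcomp := pv_comparand_eq array L i hiL
  set comparand := pvGetComparand array (i : Int) (L : Int) with hcompdef
  have hlen : comparand.length = L := by rw [hcomp]; simp; omega
  have hget : ∀ j, j < L → comparand.getD j 0 = array.getD (i + j) 0 := by
    intro j hj
    rw [hcomp, List.getD_eq_getElem _ _ (by simp; omega), List.getElem_take, List.getElem_drop,
      List.getD_eq_getElem _ _ (by omega)]
  have hrle : r ≤ m - i := runF_le array L m i
  have hkL : k * L ≤ r := Nat.div_mul_le_self r L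
  have hblock : ∀ c', c' * L ≤ r → ∀ j, j < L →
      array.getD (i + j) 0 = array.getD (i + c' * L + j) 0 := by
    intro c' hc' j hj
    have him : i ≤ m := by omega
    have heqs := ((runF_ge_iff array L m (c' * L) i him).mp (by omega)).2
    have h2 := pv_tele array L c' (i + j) (fun u hu => by
      refine heqs (i + j + u * L) (by omega) ?_
      have h3 : (u + 1) * L ≤ c' * L := Nat.mul_le_mul_right L (by omega)
      have h4 : (u + 1) * L = u * L + L := Nat.succ_mul u L
      omega)
    rwa [show i + j + c' * L = i + c' * L + j from by omega] at h2
  have hkq : k ≤ q := Nat.div_le_div_right hrle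
  have hall : ∀ c, c < k →
      pvCompare array comparand (((i + (c + 1) * L : Nat)) : Int) = true := by
    intro c hc
    have hcL : (c + 1) * L ≤ r := by
      have := Nat.mul_le_mul_right L (show c + 1 ≤ k by omega)
      omega
    have hee : (i + (c + 1) * L) + comparand.length ≤ n := by rw [hlen]; omega
    rw [pv_compare_iff array comparand _ hee]
    intro j hj
    rw [hlen] at hj
    rw [hget j hj]
    exact hblock (c + 1) hcL j hj
  have hstop : k = q ∨ pvCompare array comparand (((i + (k + 1) * L : Nat)) : Int) = false := by
    by_cases hkq2 : k = q
    · exact Or.inl hkq2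
    · right
      have hkq3 : k + 1 ≤ q := by omega
      have hqL : (k + 1) * L ≤ m - i := (Nat.le_div_iff_mul_le (by omega)).mp hkq3
      by_contra hbc
      have hb : pvCompare array comparand (((i + (k + 1) * L : Nat)) : Int) = true := by
        revert hbc
        cases pvCompare array comparand (((i + (k + 1) * L : Nat)) : Int) <;> simp
      have hee : (i + (k + 1) * L) + comparand.length ≤ n := by rw [hlen]; omega
      have hbl := (pv_compare_iff array comparand _ hee).mp hb
      have hblocks2 : ∀ c', 1 ≤ c' → c' ≤ k + 1 → ∀ j, j < L →
          array.getD (i + j) 0 = array.getD (i + c' * L + j) 0 := by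
        intro c' h1 h2 j hj
        rcases Nat.lt_or_ge c' (k + 1) with hlt2 | hge2
        · refine hblock c' ?_ j hj
          have := Nat.mul_le_mul_right L (show c' ≤ k by omega)
          omega
        · have hc' : c' = k + 1 := by omega
          subst hc'
          have h5 := hbl j (by rwa [hlen])
          rw [hget j hj] at h5
          exact h5
      have heqall := pv_eq_of_blocks array L i (k + 1) hL hblocks2
      have hge : (k + 1) * L ≤ r :=
        ((runF_ge_iff array L m ((k + 1) * L) i (by omega)).mpr
          ⟨by omega, fun s a b => heqall s a b⟩)
      have : k + 1 ≤ r / L := (Nat.le_div_iff_mul_le (by omega)).mpr hge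
      omega
  have hrange : PySem.List.pyRange ((i : Int) + (L : Int)) ((n : Int) - (L : Int) + 1) (L : Int)
      = (List.range q).map (fun c => (((i + (c + 1) * L : Nat)) : Int)) := by
    rw [PySem.List.pyRange_of_pos _ _ (by omega)]
    rw [if_pos (by omega)]
    have e6 : ((n : Int) - (L : Int) + 1 - ((i : Int) + (L : Int)) + (L : Int) - 1)
        = ((m - i : Nat) : Int) := by omega
    rw [e6, show ((m - i : Nat) : Int) / (L : Int) = (((m - i) / L : Nat) : Int)
      from (Int.natCast_div _ _).symm]
    rw [Int.toNat_natCast]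
    refine List.map_congr_left (fun c hc => ?_)
    push_cast
    ring
  rw [hrange, pvInner_eq_takeWhile array comparand]
  rw [pv_takeWhile_map_range (fun e => pvCompare array comparand e) q
    (fun c => (((i + (c + 1) * L : Nat)) : Int)) k hkq hall hstop]

theorem pv_outer_eq_scanF (array : List Int) (L : Nat) (hL : 1 ≤ L) :
    ∀ l : List Nat, (∀ i ∈ l, i + 2 * L ≤ array.length) →
    pvOuter array (L : Int) (l.map (fun i : Nat => (i : Int))) = pvScanF array L l := by
  intro l
  induction l with
  | nil => intro _; rfl
  | cons i rest ih =>
    intro hmem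
    have hi : i + 2 * L ≤ array.length := hmem i List.mem_cons_self
    simp only [List.map_cons, pvOuter, pvScanF]
    rw [pv_inner_count array L i hL hi]
    set r := runF array L (array.length - L) i with hr
    by_cases hpos : L ≤ r
    · have h1 : 1 ≤ r / L := (Nat.le_div_iff_mul_le (by omega)).mpr (by omega)
      rw [if_pos (show (((r / L : Nat)) : Int) > 0 by omega), if_pos hpos]
      rw [pv_comparand_eq array L i (by omega)]
    · have h0 : r / L = 0 := Nat.div_eq_of_lt (by omega)
      rw [if_neg (show ¬ ((((r / L : Nat)) : Int) > 0) by omega), if_neg hpos]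
      exact ih fun j hj => hmem j (List.mem_cons_of_mem _ hj)

theorem pvExtend_spec (array : List Int) (L m : Nat) : ∀ t, t ≤ m →
    t ≤ pvExtend array L m t ∧ pvExtend array L m t ≤ m ∧
    (∀ u, t ≤ u → u < pvExtend array L m t → array.getD u 0 = array.getD (u + L) 0) ∧
    (pvExtend array L m t = m ∨ ¬ array.getD (pvExtend array L m t) 0 = array.getD (pvExtend array L m t + L) 0) := by
  intro t
  induction' hd : m - t with d ih generalizing t
  · intro ht
    have htm : t = m := by omega
    rw [pvExtend, if_neg (by omega)]
    exact ⟨le_refl t, by omega, fun u h1 h2 => by omega, Or.inl htm⟩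
  · intro ht
    by_cases htm : t < m
    · rw [pvExtend, if_pos htm]
      by_cases heq : array.getD t 0 = array.getD (t + L) 0
      · rw [if_pos (by simpa using heq)]
        obtain ⟨e1, e2, e3, e4⟩ := ih (t + 1) (by omega) (by omega)
        refine ⟨by omega, e2, fun u h1 h2 => ?_, e4⟩
        by_cases hut : u = t
        · subst hut; exact heq
        · exact e3 u (by omega) h2
      · rw [if_neg (by simpa using heq)]
        exact ⟨le_refl t, by omega, fun u h1 h2 => by omega, Or.inr heq⟩
    · omega

theorem pvScanF_all_small (array : List Int) (L : Nat) :
    ∀ l : List Nat, (∀ i ∈ l, runF array L (array.length - L) i < L) →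
    pvScanF array L l = (false, 0, 0, [], 0) := by
  intro l
  induction l with
  | nil => intro _; rfl
  | cons i rest ih =>
    intro hmem
    rw [pvScanF, if_neg (by have := hmem i List.mem_cons_self; omega)]
    exact ih fun j hj => hmem j (List.mem_cons_of_mem _ hj)

theorem pvScanF_skip (array : List Int) (L N : Nat) :
    ∀ d s, (∀ i, s ≤ i → i < s + d → runF array L (array.length - L) i < L) →
    pvScanF array L (List.range' s (N - s)) = pvScanF array L (List.range' (s + d) (N - (s + d))) := by
  intro d
  induction d with
  | zero => intro s _; rfl
  | succ d ih =>
    intro s hsmall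
    have h1 : pvScanF array L (List.range' s (N - s))
        = pvScanF array L (List.range' (s + 1) (N - (s + 1))) := by
      by_cases hsN : s < N
      · rw [show N - s = (N - (s + 1)) + 1 from by omega, List.range'_succ]
        rw [pvScanF, if_neg (by have := hsmall s (le_refl s) (by omega); omega)]
      · rw [show N - s = 0 from by omega, show N - (s + 1) = 0 from by omega]
        rfl
    rw [h1, ih (s + 1) (fun i hi1 hi2 => hsmall i (by omega) (by omega)),
      show s + 1 + d = s + (d + 1) from by omega]

-- runF i is cut short by a failing position t ≥ i
theorem runF_le_of_fail (array : List Int) (L m : Nat) (i t : Nat) (hit : i ≤ t) (htm : t < m)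
    (hfail : ¬ array.getD t 0 = array.getD (t + L) 0) :
    runF array L m i ≤ t - i := by
  by_contra hcon
  have := ((runF_ge_iff array L m (t - i + 1) i (by omega)).mp (by omega)).2
  exact hfail (this t hit (by omega))

-- the forward scan of B agrees with the abstract first-hit scan
theorem pvLoop_eq (array : List Int) (L : Nat) (hL : 1 ≤ L) (hn : 2 * L ≤ array.length) :
    ∀ t s, s ≤ t → t ≤ array.length - L → t - s < L →
    (∀ u, s ≤ u → u < t → array.getD u 0 = array.getD (u + L) 0) →
    (∀ i, i < s → runF array L (array.length - L) i < L) →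
    pvLoop array L (array.length - L) s t
      = pvScanF array L (List.range' s (array.length - 2 * L + 1 - s)) := by
  set n := array.length with hnn
  set m := n - L with hm
  set N := n - 2 * L + 1 with hN
  intro t
  induction' hd : m - t with d ih generalizing t
  · intro s hst htm hts hpre hsmall
    rw [pvLoop, if_neg (by omega)]
    refine (pvScanF_all_small array L _ (fun i hi => ?_)).symm
    have hiN : i < N := by
      have := List.mem_range'_1.mp hi
      omega
    have h1 := runF_le array L m i
    have h2 : s ≤ i := (List.mem_range'_1.mp hi).1
    omega
  · intro s hst htm hts hpre hsmall
    have htm2 : t < m := by omega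
    rw [pvLoop, if_pos htm2]
    by_cases heq : array.getD t 0 = array.getD (t + L) 0
    · rw [if_neg (by simpa using heq)]
      by_cases hwin : t + 1 - s = L
      · rw [if_pos hwin]
        have hsm : s + L ≤ m := by omega
        have hrge : L ≤ runF array L m s := by
          refine ((runF_ge_iff array L m L s (by omega)).mpr ⟨by omega, fun u h1 h2 => ?_⟩)
          by_cases hut : u = t
          · subst hut; exact heq
          · exact hpre u h1 (by omega)
        obtain ⟨e1, e2, e3, e4⟩ := pvExtend_spec array L m (t + 1) (by omega)
        set t2 := pvExtend array L m (t + 1) with ht2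
        have hrun : runF array L m s = t2 - s := by
          have hge : t2 - s ≤ runF array L m s := by
            refine ((runF_ge_iff array L m (t2 - s) s (by omega)).mpr
              ⟨by omega, fun u h1 h2 => ?_⟩)
            by_cases hu1 : u < t
            · exact hpre u h1 hu1
            · by_cases hu2 : u = t
              · subst hu2; exact heq
              · exact e3 u (by omega) (by omega)
          have hle : runF array L m s ≤ t2 - s := by
            rcases e4 with h | h
            · have := runF_le array L m s
              omega
            · by_cases ht2m : t2 < m
              · have := runF_le_of_fail array L m s t2 (by omega) ht2m h
                omega
              · have := runF_le array L m s
                omega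
          omega
        have hsN : s < N := by omega
        rw [show N - s = (N - (s + 1)) + 1 from by omega, List.range'_succ, pvScanF,
          if_pos hrge, hrun]
        simp only [PySem.List.slice_natCast_add]
      · rw [if_neg hwin]
        refine ih (t + 1) (by omega) s (by omega) (by omega) (by omega) (fun u h1 h2 => ?_) hsmall
        by_cases hut : u = t
        · subst hut; exact heq
        · exact hpre u h1 (by omega)
    · rw [if_pos (by simpa using heq)]
      have hsmall2 : ∀ i, i < t + 1 → runF array L m i < L := by
        intro i hi
        by_cases his : i < s
        · exact hsmall i his
        · have := runF_le_of_fail array L m i t (by omega) htm2 heq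
          omega
      rw [ih (t + 1) (by omega) (t + 1) (le_refl _) (by omega) (by omega)
        (fun u h1 h2 => by omega) hsmall2]
      have hsk := pvScanF_skip array L N (t + 1 - s) s (fun i h1 h2 => hsmall2 i (by omega))
      rw [show s + (t + 1 - s) = t + 1 from by omega] at hsk
      exact hsk.symm

theorem pv_outer_neg (array : List Int) (maxLen : Int) (hneg : maxLen < 0) :
    ∀ l : List Int, (∀ i ∈ l, i + maxLen < (array.length : Int) - maxLen + 1) →
    pvOuter array maxLen l = (false, 0, 0, [], 0) := by
  intro l
  induction l with
  | nil => intro _; rfl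
  | cons i rest ih =>
    intro hmem
    have hr : PySem.List.pyRange (i + maxLen) ((array.length : Int) - maxLen + 1) maxLen = [] :=
      pv_pyRange_neg_nil _ _ _ hneg (le_of_lt (hmem i (List.mem_cons_self)))
    simp only [pvOuter, hr, pvInner]
    rw [if_neg (by omega)]
    exact ih fun j hj => hmem j (List.mem_cons_of_mem _ hj)

-- ===== VERDICT (by name: the statement is the Claim_ definition above) =====
theorem TryFindFirstPattern_spec : Claim_equal_TryFindFirstPattern := by
  intro array maxLen _ hpre
  unfold Spec_TryFindFirstPattern TryFindFirstPattern TryFindFirstPattern_alt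
  rcases lt_trichotomy maxLen 0 with hneg | h0 | hpos
  · rw [if_neg (show ¬ (maxLen * 2 > (array.length : Int)) by omega)]
    rw [if_pos (Or.inl (by omega))]
    refine pv_outer_neg array maxLen hneg _ (fun i hi => ?_)
    have := (PySem.List.mem_pyRange_one).mp hi
    omega
  · exact absurd h0 hpre
  · obtain ⟨L, rfl⟩ : ∃ L : Nat, maxLen = (L : Int) := ⟨maxLen.toNat, by omega⟩
    have hL : 1 ≤ L := by omega
    by_cases hbig : 2 * L > array.length
    · rw [if_pos (by omega), if_pos (Or.inr (by omega))]
    · rw [if_neg (by omega), if_neg (by omega)]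
      simp only [Int.toNat_natCast]
      rw [PySem.List.pyRange_one]
      have e1 : (((array.length : Int) - 2 * (L : Int) + 1) - 0).toNat
          = array.length - 2 * L + 1 := by omega
      rw [e1]
      have e2 : (fun k : Nat => (0 : Int) + (k : Int)) = (fun k : Nat => (k : Int)) := by
        funext k; ring
      rw [e2]
      rw [pv_outer_eq_scanF array L hL _ (fun i hi => by
        simp only [List.mem_range] at hi; omega)]
      rw [show pvLoop array L (array.length - L) 0 0
          = pvScanF array L (List.range' 0 (array.length - 2 * L + 1 - 0)) from
        pvLoop_eq array L hL (by omega) 0 0 (le_refl 0) (by omega) (by omega)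
          (fun u h1 h2 => by omega) (fun i hi => by omega)]
      rw [Nat.sub_zero, ← List.range_eq_range']
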